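-- pv_equiv track=rewrite | github.com/photboll/leetcode | 60.permutation-sequence.py | orderToDigitSequence
-- ===== SOURCE A (Python) =====
-- def orderToDigitSequence(order, digits="123456789"):
--     available = [True] * (len(order) +1)
--     result = ""
--
--     for skipAvailable in order:
--         count = -1
--         for i in range(len(available)):
--             if available[i]:
--                 count += 1
--             if count == skipAvailable:
--                 result+= digits[i]
--                 available[i] = False
--                 break
--     return result
-- ===== SOURCE B (Python) =====
-- def orderToDigitSequence(order, digits="123456789"):
--     pool = list(range(len(order) + 1))
--     out = []
--     for k in order:
--         if 0 <= k < len(pool):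
--             out.append(digits[pool.pop(k)])
--     return "".join(out)
-- ===== Notes on version B (the rewrite author's own statement) =====
-- stated objective: alternative
-- what changed: B keeps one pool list of the still-available slot indices and pops the k-th one directly, eliminating A's boolean availability array and its inner rescanning counter loop.
-- intended difference: On orders containing a -1 after an earlier 0, A's count=-1 sentinel re-matches the already-consumed slot 0 and appends the first digit character once more per such -1, while B skips the out-of-range index -1 like every other negative index, which is the intended behaviour. — e.g. on orderToDigitSequence([0, -1], "123456789"): A returns "11", B returns "1"
-- outside the precondition, e.g. on orderToDigitSequence([0, 2], 'ab'): A returns 'a', B returns 'a'; on orderToDigitSequence([0, 1], 'ab'): A raises IndexError, B raises IndexError; on orderToDigitSequence([0, -1, 3], 'ab'): A returns 'aa', B returns 'a'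
import Mathlib
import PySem

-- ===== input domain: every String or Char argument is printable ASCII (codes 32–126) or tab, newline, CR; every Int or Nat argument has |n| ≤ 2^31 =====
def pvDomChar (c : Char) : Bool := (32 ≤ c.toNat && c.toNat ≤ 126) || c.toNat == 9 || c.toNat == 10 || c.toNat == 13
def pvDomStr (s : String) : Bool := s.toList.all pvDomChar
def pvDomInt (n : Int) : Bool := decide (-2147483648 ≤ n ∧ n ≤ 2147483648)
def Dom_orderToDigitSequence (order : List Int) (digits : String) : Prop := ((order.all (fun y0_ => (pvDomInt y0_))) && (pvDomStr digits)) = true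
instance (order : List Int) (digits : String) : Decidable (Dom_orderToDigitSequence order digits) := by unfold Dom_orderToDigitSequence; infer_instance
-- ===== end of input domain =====

-- B keeps one pool of the still-available slot indices and pops the k-th one directly,
-- replacing A's boolean availability array and its inner rescanning counter loop
-- (objective: alternative); on orders containing a -1 after a 0, A appends the
-- first digit again (its count = -1 sentinel re-matches the consumed slot 0) while B
-- skips it — see D_.

-- ===== PORT A =====
-- inner 'for i in range(len(available))' loop of A: walks the availability list bs in step
-- with the aligned suffix of digits (so cs.head? is exactly digits[i]; none = the IndexError
-- case, which Pre_ excludes); returns the updated availability list and the appended char.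
def aInner (k count : Int) : List Bool → List Char → List Bool × Option Char
  | [], _ => ([], none)
  | b :: bs, cs =>
    let count' := if b then count + 1 else count
    if count' = k then
      (false :: bs, cs.head?)
    else
      let r := aInner k count' bs cs.tail
      (b :: r.1, r.2)

-- one iteration of A's outer 'for skipAvailable in order' loop
def stepA (cs : List Char) (st : List Bool × List Char) (k : Int) : List Bool × List Char :=
  let r := aInner k (-1) st.1 cs
  (r.1, st.2 ++ r.2.toList)

def orderToDigitSequence (order : List Int) (digits : String) : String :=
  String.mk ((order.foldl (stepA digits.toList) (List.replicate (order.length + 1) true, [])).2)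

-- ===== PORT B =====
-- one iteration of B's loop: 'if 0 <= k < len(pool): out.append(digits[pool.pop(k)])'
-- ('digits[i]' is PySem.List.pyGet?; its none = the IndexError case, which Pre_ excludes)
def stepB (ds : List Char) (st : List Int × List Char) (k : Int) : List Int × List Char :=
  if 0 ≤ k ∧ k < (st.1.length : Int) then
    match PySem.List.pop? st.1 k with
    | some r => (r.2, st.2 ++ (PySem.List.pyGet? ds r.1).toList)
    | none => st
  else st

def orderToDigitSequence_alt (order : List Int) (digits : String) : String :=
  String.mk ((order.foldl (stepB digits.toList)
    (PySem.List.pyRange 0 ((order.length : Int) + 1) 1, [])).2)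

-- ===== PRECONDITION & SPEC =====
-- Pre_ excludes the inputs on which A can raise IndexError (a pick landing at a slot index
-- ≥ len(digits)); the exact crash set depends on the whole run, so Pre_ is a closed-form
-- sufficient bound (the slot picked for an in-range index k is at most k + the number of
-- earlier in-range elements): it thereby also conservatively excludes some inputs on which
-- A still returns — B behaves identically there (same value, or, inside D_, the D_
-- difference; see cites) — and the equivalence proof below does not in fact need Pre_.
def Pre_orderToDigitSequence (order : List Int) (digits : String) : Prop :=
  order.length + 1 ≤ digits.toList.length ∨
    (order.zipIdx.all fun p =>
      decide (p.1 < 0) || decide ((order.length : Int) < p.1) ||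
        decide (p.1 + (((order.take p.2).countP
            (fun x => decide (0 ≤ x ∧ x ≤ (order.length : Int)))) : Int) <
          (digits.toList.length : Int))) = true
instance (order : List Int) (digits : String) : Decidable (Pre_orderToDigitSequence order digits) := by unfold Pre_orderToDigitSequence; infer_instance

def pvWitness_orderToDigitSequence : List Int × String := ([2, 0, 1], "123456789")

-- dQuirk order = true iff some 0 in order is later followed by a -1
def dQuirk : List Int → Bool
  | [] => false
  | x :: r => (x == 0 && r.contains (-1)) || dQuirk r

-- On orders containing a -1 after an earlier 0, A appends the first digit once more for each such -1
-- (its count starts at -1, so the consumed slot 0 matches it again) while B skips the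
-- out-of-range index -1 like every other negative index, which is the intended behaviour.
def D_orderToDigitSequence (order : List Int) (digits : String) : Prop :=
  dQuirk order = true
instance (order : List Int) (digits : String) : Decidable (D_orderToDigitSequence order digits) := by unfold D_orderToDigitSequence; infer_instance

def Spec_orderToDigitSequence (order : List Int) (digits : String) (out : String) : Prop :=
  ¬ D_orderToDigitSequence order digits → out = orderToDigitSequence_alt order digits
instance (order : List Int) (digits : String) (out : String) : Decidable (Spec_orderToDigitSequence order digits out) := by unfold Spec_orderToDigitSequence; infer_instance

def pvDiffWitness_orderToDigitSequence : List Int × String := ([0, -1], "123456789")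
def pvDiffWitnessOut_orderToDigitSequence : String × String := ("11", "1")

-- ===== CLAIM (what is proved, stated in full; the proofs are below) =====
def Claim_unchanged_orderToDigitSequence : Prop := ∀ (order : List Int) (digits : String), Dom_orderToDigitSequence order digits → Pre_orderToDigitSequence order digits → Spec_orderToDigitSequence order digits (orderToDigitSequence order digits)
def Claim_changed_orderToDigitSequence : Prop := Dom_orderToDigitSequence (pvDiffWitness_orderToDigitSequence.1) (pvDiffWitness_orderToDigitSequence.2) ∧ Pre_orderToDigitSequence (pvDiffWitness_orderToDigitSequence.1) (pvDiffWitness_orderToDigitSequence.2) ∧ D_orderToDigitSequence (pvDiffWitness_orderToDigitSequence.1) (pvDiffWitness_orderToDigitSequence.2) ∧ orderToDigitSequence (pvDiffWitness_orderToDigitSequence.1) (pvDiffWitness_orderToDigitSequence.2) = pvDiffWitnessOut_orderToDigitSequence.1 ∧ orderToDigitSequence_alt (pvDiffWitness_orderToDigitSequence.1) (pvDiffWitness_orderToDigitSequence.2) = pvDiffWitnessOut_orderToDigitSequence.2 ∧ pvDiffWitnessOut_orderToDigitSequence.1 ≠ pvDiffWitnessOut_orderToDigitSequence.2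
def Claim_exact_orderToDigitSequence : Prop := ∀ (order : List Int) (digits : String), Dom_orderToDigitSequence order digits → Pre_orderToDigitSequence order digits → D_orderToDigitSequence order digits → orderToDigitSequence order digits ≠ orderToDigitSequence_alt order digits

-- ===== LEMMAS AND PROOFS =====

-- the indices of the still-available slots, bs starting at absolute position i
def avail : List Bool → Nat → List Nat
  | [], _ => []
  | b :: bs, i => if b then i :: avail bs (i + 1) else avail bs (i + 1)

theorem avail_replicate (m i : Nat) :
    avail (List.replicate m true) i = List.range' i m := by
  induction m generalizing i with
  | zero => simp [avail]
  | succ n ih => simp [List.replicate, avail, List.range', ih]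

theorem avail_length (bs : List Bool) (i : Nat) :
    (avail bs i).length = bs.count true := by
  induction bs generalizing i with
  | nil => simp [avail]
  | cons b bs ih =>
    cases b <;> simp [avail, ih]

theorem pool_init (n : Nat) :
    PySem.List.pyRange 0 (n : Int) 1 = (List.range' 0 n).map (fun n : Nat => (n : Int)) := by
  rw [PySem.List.pyRange_one]; simp [List.range_eq_range']

-- A's inner loop finds nothing once count has passed k
theorem aInner_gt (bs : List Bool) (cs : List Char) (count k : Int) (h : k < count) :
    aInner k count bs cs = (bs, none) := by
  induction bs generalizing cs count with
  | nil => rfl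
  | cons b bs ih =>
    cases b with
    | true =>
      simp only [aInner, if_true]
      rw [if_neg (by omega : ¬ (count + 1 = k)), ih cs.tail (count + 1) (by omega)]
    | false =>
      simp only [aInner, Bool.false_eq_true, if_false]
      rw [if_neg (by omega : ¬ (count = k)), ih cs.tail count h]

-- negative k: A's inner loop is a no-op unless k = -1 and slot 0 is already consumed
theorem aInner_neg (bs : List Bool) (cs : List Char) (k : Int) (hk : k < 0)
    (hq : k = -1 → bs.head? ≠ some false) :
    aInner k (-1) bs cs = (bs, none) := by
  cases bs with
  | nil => rfl
  | cons b bs =>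
    cases b with
    | true =>
      simp only [aInner, if_true]
      rw [if_neg (by omega : ¬ ((-1 : Int) + 1 = k)), aInner_gt bs cs.tail (-1 + 1) k (by omega)]
    | false =>
      by_cases h1 : k = -1
      · exact absurd (by simp) (hq h1)
      · simp only [aInner, Bool.false_eq_true, if_false]
        rw [if_neg (by omega : ¬ ((-1 : Int) = k)), aInner_gt bs cs.tail (-1) k (by omega)]

-- k beyond the number of available slots: count' never reaches k, no-op
theorem aInner_noMatch (bs : List Bool) (cs : List Char) (count k : Int)
    (h : (bs.count true : Int) ≤ k - count - 1) :
    aInner k count bs cs = (bs, none) := by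
  induction bs generalizing cs count with
  | nil => rfl
  | cons b bs ih =>
    cases b with
    | true =>
      have hcount : (true :: bs).count true = bs.count true + 1 := by simp
      rw [hcount] at h; push_cast at h
      simp only [aInner, if_true]
      rw [if_neg (by omega : ¬ (count + 1 = k)),
        ih cs.tail (count + 1) (by push_cast; omega)]
    | false =>
      have hcount : (false :: bs).count true = bs.count true := by simp
      rw [hcount] at h
      simp only [aInner, Bool.false_eq_true, if_false]
      rw [if_neg (by omega : ¬ (count = k)), ih cs.tail count h]

-- hit: A's inner loop picks the j-th available slot (j = k - count - 1) and reads
-- digits at exactly that slot's absolute index — the same index B reads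
theorem aInner_hit (bs : List Bool) (ds : List Char) (i : Nat) (count k : Int)
    (hck : count < k) (hm : (k - count - 1).toNat < (avail bs i).length) :
    (aInner k count bs (ds.drop i)).2 = ds[(avail bs i).getD (k - count - 1).toNat 0]? ∧
    avail (aInner k count bs (ds.drop i)).1 i = (avail bs i).eraseIdx (k - count - 1).toNat ∧
    (aInner k count bs (ds.drop i)).1.head? =
      (if k - count - 1 = 0 ∧ bs.head? = some true then some false else bs.head?) := by
  induction bs generalizing i count with
  | nil => simp [avail] at hm
  | cons b bs ih =>
    cases b with
    | true =>
      by_cases h0 : count + 1 = k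
      · have hj : (k - count - 1).toNat = 0 := by omega
        simp only [aInner, if_true, if_pos h0, hj, avail]
        refine ⟨by simp [List.head?_drop], by simp [avail], by simp [show k - count - 1 = 0 by omega]⟩
      · have hj : (k - count - 1).toNat = (k - (count + 1) - 1).toNat + 1 := by omega
        simp only [avail, if_true, List.length_cons, hj] at hm
        have hm' : (k - (count + 1) - 1).toNat < (avail bs (i + 1)).length := by omega
        have hrec := ih (i + 1) (count + 1) (by omega) hm'
        simp only [aInner, if_true, if_neg h0, List.tail_drop]
        refine ⟨?_, ?_, ?_⟩
        · simp only [avail, if_true, hj, List.getD_cons_succ]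
          exact hrec.1
        · simp only [avail, if_true, hj, List.eraseIdx_cons_succ]
          rw [hrec.2.1]
        · simp [show ¬ (k - count - 1 = 0) by omega]
    | false =>
      simp only [avail, Bool.false_eq_true, if_false] at hm
      have hrec := ih (i + 1) count hck hm
      simp only [aInner, Bool.false_eq_true, if_false, if_neg (by omega : ¬ (count = k)),
        List.tail_drop]
      refine ⟨?_, ?_, by simp⟩
      · simp only [avail, Bool.false_eq_true, if_false]
        exact hrec.1
      · simp only [avail, Bool.false_eq_true, if_false]
        exact hrec.2.1

-- B's pool state after popping index j equals the avail list of A's updated availability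
theorem pool_pop (bs : List Bool) (j : Nat) (hj : j < (avail bs 0).length) :
    PySem.List.pop? ((avail bs 0).map (fun n : Nat => (n : Int))) (j : Int) =
      some ((((avail bs 0).getD j 0 : Nat) : Int),
        ((avail bs 0).eraseIdx j).map (fun n : Nat => (n : Int))) := by
  have hj' : j < ((avail bs 0).map (fun n : Nat => (n : Int))).length := by simpa using hj
  rw [PySem.List.pop?_natCast _ _ hj']
  simp [List.getD_eq_getElem?_getD, List.getElem?_eq_getElem hj, ← List.eraseIdx_map]

-- main loop invariant: B's pool is exactly the indices of A's available slots
theorem fold_eq (ord : List Int) (bs : List Bool) (ds : List Char) (acc : List Char)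
    (hhd : bs.head? = some false → (-1 : Int) ∉ ord)
    (hq : dQuirk ord = false) :
    (ord.foldl (stepA ds) (bs, acc)).2 =
      (ord.foldl (stepB ds) ((avail bs 0).map (fun n : Nat => (n : Int)), acc)).2 := by
  induction ord generalizing bs acc with
  | nil => rfl
  | cons k rest ih =>
    have hq' : dQuirk rest = false := by
      simp [dQuirk] at hq; exact hq.2
    have hk0 : k = 0 → ¬ (-1 : Int) ∈ rest := by
      intro h0; simp [dQuirk, h0] at hq; simpa using hq.1
    have hhd' : bs.head? = some false → (-1 : Int) ∉ rest :=
      fun hf hm => (hhd hf) (List.mem_cons_of_mem _ hm)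
    by_cases hneg : k < 0
    · have hA : aInner k (-1) bs ds = (bs, none) := by
        apply aInner_neg _ _ _ hneg
        intro hk1 hf
        exact (hhd hf) (by rw [hk1]; exact List.mem_cons_self)
      have hB : ¬ (0 ≤ k ∧ k < ((((avail bs 0).map (fun n : Nat => (n : Int))).length : Nat) : Int)) := by omega
      simp only [List.foldl_cons, stepA, stepB, hA, if_neg hB, Option.toList_none,
        List.append_nil]
      exact ih bs acc hhd' hq'
    · rw [not_lt] at hneg
      by_cases hin : k.toNat < (avail bs 0).length
      · have hj : (k - (-1) - 1).toNat = k.toNat := by omega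
        have hhit := aInner_hit bs ds 0 (-1) k (by omega) (by rw [hj]; exact hin)
        rw [hj, List.drop_zero] at hhit
        have hpop := pool_pop bs k.toNat hin
        rw [(by omega : ((k.toNat : Nat) : Int) = k)] at hpop
        have hB : 0 ≤ k ∧ k < ((((avail bs 0).map (fun n : Nat => (n : Int))).length : Nat) : Int) := by
          simpa using ⟨hneg, by omega⟩
        simp only [List.foldl_cons, stepA, stepB, if_pos hB, hpop, hhit.1,
          PySem.List.pyGet?_natCast]
        rw [ih _ _ ?_ hq']
        · rw [hhit.2.1]
        · intro hf
          rw [hhit.2.2] at hf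
          by_cases hc : k - (-1) - 1 = 0 ∧ bs.head? = some true
          · exact hk0 (by omega)
          · rw [if_neg hc] at hf; exact hhd' hf
      · have hA : aInner k (-1) bs ds = (bs, none) := by
          apply aInner_noMatch
          rw [← avail_length bs 0]; omega
        have hB : ¬ (0 ≤ k ∧ k < ((((avail bs 0).map (fun n : Nat => (n : Int))).length : Nat) : Int)) := by
          simp only [List.length_map]; omega
        simp only [List.foldl_cons, stepA, stepB, hA, if_neg hB, Option.toList_none,
          List.append_nil]
        exact ih bs acc hhd' hq'

-- a quirky order (some 0 followed later by a -1) contains a 0 and a -1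
theorem dQuirk_zero_mem (l : List Int) (h : dQuirk l = true) : (0 : Int) ∈ l := by
  induction l with
  | nil => simp [dQuirk] at h
  | cons x r ih =>
    simp only [dQuirk, Bool.or_eq_true, Bool.and_eq_true] at h
    rcases h with ⟨h0, _⟩ | h
    · simp at h0; simp [h0]
    · exact List.mem_cons_of_mem _ (ih h)

theorem dQuirk_neg_mem (l : List Int) (h : dQuirk l = true) : (-1 : Int) ∈ l := by
  induction l with
  | nil => simp [dQuirk] at h
  | cons x r ih =>
    simp only [dQuirk, Bool.or_eq_true, Bool.and_eq_true] at h
    rcases h with ⟨_, hm⟩ | h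
    · simp at hm; exact List.mem_cons_of_mem _ hm
    · exact List.mem_cons_of_mem _ (ih h)

-- A's output never falls behind B's: the length gap d is preserved by the paired loops
theorem fold_diff (ord : List Int) (bs : List Bool) (ds : List Char)
    (accA accB : List Char) (d : Nat)
    (hd : accB.length + d ≤ accA.length) :
    (ord.foldl (stepB ds) ((avail bs 0).map (fun n : Nat => (n : Int)), accB)).2.length + d ≤
      (ord.foldl (stepA ds) (bs, accA)).2.length := by
  induction ord generalizing bs accA accB with
  | nil => exact hd
  | cons k rest ih =>
    by_cases hneg : k < 0
    · by_cases hqk : k = -1 ∧ bs.head? = some false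
      · obtain ⟨hk1, hf⟩ := hqk
        cases bs with
        | nil => simp at hf
        | cons b bs' =>
          have hb : b = false := by simpa using hf
          subst hb; subst hk1
          have hA : aInner (-1) (-1) (false :: bs') ds = (false :: bs', ds.head?) := by
            simp [aInner]
          have hB : ¬ ((0 : Int) ≤ -1 ∧
              (-1 : Int) < ((((avail (false :: bs') 0).map (fun n : Nat => (n : Int))).length : Nat) : Int)) := by
            omega
          simp only [List.foldl_cons, stepA, stepB, hA, if_neg hB]
          exact ih (false :: bs') (accA ++ ds.head?.toList) accB (by simp; omega)
      · have hA : aInner k (-1) bs ds = (bs, none) := by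
          apply aInner_neg _ _ _ hneg
          intro hk1 hf
          exact hqk ⟨hk1, hf⟩
        have hB : ¬ (0 ≤ k ∧ k < ((((avail bs 0).map (fun n : Nat => (n : Int))).length : Nat) : Int)) := by omega
        simp only [List.foldl_cons, stepA, stepB, hA, if_neg hB, Option.toList_none,
          List.append_nil]
        exact ih bs accA accB hd
    · rw [not_lt] at hneg
      by_cases hin : k.toNat < (avail bs 0).length
      · have hj : (k - (-1) - 1).toNat = k.toNat := by omega
        have hhit := aInner_hit bs ds 0 (-1) k (by omega) (by rw [hj]; exact hin)
        rw [hj, List.drop_zero] at hhit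
        have hpop := pool_pop bs k.toNat hin
        rw [(by omega : ((k.toNat : Nat) : Int) = k)] at hpop
        have hB : 0 ≤ k ∧ k < ((((avail bs 0).map (fun n : Nat => (n : Int))).length : Nat) : Int) := by
          simpa using ⟨hneg, by omega⟩
        simp only [List.foldl_cons, stepA, stepB, if_pos hB, hpop, hhit.1,
          PySem.List.pyGet?_natCast]
        rw [← hhit.2.1]
        exact ih _ _ _ (by simp; omega)
      · have hA : aInner k (-1) bs ds = (bs, none) := by
          apply aInner_noMatch
          rw [← avail_length bs 0]; omega
        have hB : ¬ (0 ≤ k ∧ k < ((((avail bs 0).map (fun n : Nat => (n : Int))).length : Nat) : Int)) := by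
          simp only [List.length_map]; omega
        simp only [List.foldl_cons, stepA, stepB, hA, if_neg hB, Option.toList_none,
          List.append_nil]
        exact ih bs accA accB hd

-- on a quirky order A's output ends up strictly longer than B's
theorem fold_strict (ord : List Int) (bs : List Bool) (ds : List Char)
    (accA accB : List Char)
    (hd : accB.length ≤ accA.length)
    (hne : ds ≠ [])
    (hcnt : ord.length ≤ (avail bs 0).length)
    (h5 : (bs.head? = some false ∧ (-1 : Int) ∈ ord) ∨
          (bs.head? = some true ∧ dQuirk ord = true)) :
    (ord.foldl (stepB ds) ((avail bs 0).map (fun n : Nat => (n : Int)), accB)).2.length <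
      (ord.foldl (stepA ds) (bs, accA)).2.length := by
  induction ord generalizing bs accA accB with
  | nil =>
    rcases h5 with ⟨_, hm⟩ | ⟨_, hq⟩
    · simp at hm
    · simp [dQuirk] at hq
  | cons k rest ih =>
    have hcnt1 : 1 ≤ (avail bs 0).length := by
      simp only [List.length_cons] at hcnt; omega
    rcases h5 with ⟨hf, hmem⟩ | ⟨ht, hq⟩
    · -- slot 0 already consumed and a -1 still ahead
      by_cases hk1 : k = -1
      · cases bs with
        | nil => simp at hf
        | cons b bs' =>
          have hb : b = false := by simpa using hf
          subst hb; subst hk1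
          obtain ⟨c, ds', rfl⟩ := List.exists_cons_of_ne_nil hne
          have hA : aInner (-1) (-1) (false :: bs') (c :: ds') = (false :: bs', some c) := by
            simp [aInner]
          have hB : ¬ ((0 : Int) ≤ -1 ∧
              (-1 : Int) < ((((avail (false :: bs') 0).map (fun n : Nat => (n : Int))).length : Nat) : Int)) := by
            omega
          simp only [List.foldl_cons, stepA, stepB, hA, if_neg hB]
          have := fold_diff rest (false :: bs') (c :: ds')
            (accA ++ (some c).toList) accB 1 (by simp; omega)
          omega
      · have hmem' : (-1 : Int) ∈ rest := by
          rcases List.mem_cons.mp hmem with h | h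
          · exact absurd h.symm hk1
          · exact h
        have hcnt' : rest.length ≤ (avail bs 0).length := by
          simp only [List.length_cons] at hcnt; omega
        by_cases hneg : k < 0
        · have hA : aInner k (-1) bs ds = (bs, none) :=
            aInner_neg _ _ _ hneg (fun h1 _ => absurd h1 hk1)
          have hB : ¬ (0 ≤ k ∧ k < ((((avail bs 0).map (fun n : Nat => (n : Int))).length : Nat) : Int)) := by omega
          simp only [List.foldl_cons, stepA, stepB, hA, if_neg hB, Option.toList_none,
            List.append_nil]
          exact ih bs accA accB hd hcnt' (Or.inl ⟨hf, hmem'⟩)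
        · rw [not_lt] at hneg
          by_cases hin : k.toNat < (avail bs 0).length
          · have hj : (k - (-1) - 1).toNat = k.toNat := by omega
            have hhit := aInner_hit bs ds 0 (-1) k (by omega) (by rw [hj]; exact hin)
            rw [hj, List.drop_zero] at hhit
            have hpop := pool_pop bs k.toNat hin
            rw [(by omega : ((k.toNat : Nat) : Int) = k)] at hpop
            have hB : 0 ≤ k ∧ k < ((((avail bs 0).map (fun n : Nat => (n : Int))).length : Nat) : Int) := by
              simpa using ⟨hneg, by omega⟩
            simp only [List.foldl_cons, stepA, stepB, if_pos hB, hpop, hhit.1,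
              PySem.List.pyGet?_natCast]
            rw [← hhit.2.1]
            have hf' : (aInner k (-1) bs ds).1.head? = some false := by
              rw [hhit.2.2, if_neg (by rw [hf]; simp)]; exact hf
            refine ih _ _ _ (by simp; omega) ?_ (Or.inl ⟨hf', hmem'⟩)
            rw [hhit.2.1, List.length_eraseIdx_of_lt hin]
            simp only [List.length_cons] at hcnt; omega
          · have hA : aInner k (-1) bs ds = (bs, none) := by
              apply aInner_noMatch
              rw [← avail_length bs 0]; omega
            have hB : ¬ (0 ≤ k ∧ k < ((((avail bs 0).map (fun n : Nat => (n : Int))).length : Nat) : Int)) := by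
              simp only [List.length_map]; omega
            simp only [List.foldl_cons, stepA, stepB, hA, if_neg hB, Option.toList_none,
              List.append_nil]
            exact ih bs accA accB hd hcnt' (Or.inl ⟨hf, hmem'⟩)
    · -- slot 0 still free: the first matched 0 consumes it; until then the head stays true
      have hsplit : (k = 0 ∧ (-1 : Int) ∈ rest) ∨ dQuirk rest = true := by
        simp only [dQuirk, Bool.or_eq_true, Bool.and_eq_true] at hq
        rcases hq with ⟨h0, hm⟩ | h
        · exact Or.inl ⟨by simpa using h0, by simpa using hm⟩
        · exact Or.inr h
      have hcnt' : rest.length ≤ (avail bs 0).length := by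
        simp only [List.length_cons] at hcnt; omega
      by_cases hk0 : k = 0
      · subst hk0
        have hmem' : (-1 : Int) ∈ rest := by
          rcases hsplit with ⟨_, hm⟩ | h
          · exact hm
          · exact dQuirk_neg_mem rest h
        have hin : (0 : Int).toNat < (avail bs 0).length := by omega
        have hj : ((0 : Int) - (-1) - 1).toNat = (0 : Int).toNat := by omega
        have hhit := aInner_hit bs ds 0 (-1) 0 (by omega) (by rw [hj]; exact hin)
        rw [hj, List.drop_zero] at hhit
        have hpop := pool_pop bs (0 : Int).toNat hin
        rw [(by omega : (((0 : Int).toNat : Nat) : Int) = 0)] at hpop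
        have hB : (0 : Int) ≤ 0 ∧ (0 : Int) < ((((avail bs 0).map (fun n : Nat => (n : Int))).length : Nat) : Int) :=
          ⟨le_refl 0, by simp only [List.length_map]; omega⟩
        simp only [List.foldl_cons, stepA, stepB, if_pos hB, hpop, hhit.1,
          PySem.List.pyGet?_natCast]
        rw [← hhit.2.1]
        have hf' : (aInner 0 (-1) bs ds).1.head? = some false := by
          rw [hhit.2.2, if_pos ⟨by omega, ht⟩]
        refine ih _ _ _ (by simp; omega) ?_ (Or.inl ⟨hf', hmem'⟩)
        rw [hhit.2.1, List.length_eraseIdx_of_lt hin]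
        simp only [List.length_cons] at hcnt; omega
      · have hqrest : dQuirk rest = true := by
          rcases hsplit with ⟨h0, _⟩ | h
          · exact absurd h0 hk0
          · exact h
        by_cases hneg : k < 0
        · have hA : aInner k (-1) bs ds = (bs, none) :=
            aInner_neg _ _ _ hneg (fun _ hfal => by rw [ht] at hfal; simp at hfal)
          have hB : ¬ (0 ≤ k ∧ k < ((((avail bs 0).map (fun n : Nat => (n : Int))).length : Nat) : Int)) := by omega
          simp only [List.foldl_cons, stepA, stepB, hA, if_neg hB, Option.toList_none,
            List.append_nil]
          exact ih bs accA accB hd hcnt' (Or.inr ⟨ht, hqrest⟩)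
        · rw [not_lt] at hneg
          by_cases hin : k.toNat < (avail bs 0).length
          · have hj : (k - (-1) - 1).toNat = k.toNat := by omega
            have hhit := aInner_hit bs ds 0 (-1) k (by omega) (by rw [hj]; exact hin)
            rw [hj, List.drop_zero] at hhit
            have hpop := pool_pop bs k.toNat hin
            rw [(by omega : ((k.toNat : Nat) : Int) = k)] at hpop
            have hB : 0 ≤ k ∧ k < ((((avail bs 0).map (fun n : Nat => (n : Int))).length : Nat) : Int) := by
              simpa using ⟨hneg, by omega⟩
            simp only [List.foldl_cons, stepA, stepB, if_pos hB, hpop, hhit.1,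
              PySem.List.pyGet?_natCast]
            rw [← hhit.2.1]
            have ht' : (aInner k (-1) bs ds).1.head? = some true := by
              rw [hhit.2.2, if_neg (by intro hc; exact hk0 (by omega))]; exact ht
            refine ih _ _ _ (by simp; omega) ?_ (Or.inr ⟨ht', hqrest⟩)
            rw [hhit.2.1, List.length_eraseIdx_of_lt hin]
            simp only [List.length_cons] at hcnt; omega
          · have hA : aInner k (-1) bs ds = (bs, none) := by
              apply aInner_noMatch
              rw [← avail_length bs 0]; omega
            have hB : ¬ (0 ≤ k ∧ k < ((((avail bs 0).map (fun n : Nat => (n : Int))).length : Nat) : Int)) := by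
              simp only [List.length_map]; omega
            simp only [List.foldl_cons, stepA, stepB, hA, if_neg hB, Option.toList_none,
              List.append_nil]
            exact ih bs accA accB hd hcnt' (Or.inr ⟨ht, hqrest⟩)

-- inside Pre_ ∩ D_ the digits string is nonempty (the 0-pick reads the first digit, which is in range)
theorem pre_d_ne (order : List Int) (digits : String)
    (hpre : Pre_orderToDigitSequence order digits) (hq : dQuirk order = true) :
    digits.toList ≠ [] := by
  intro hnil
  rcases hpre with hlen | hall
  · rw [hnil] at hlen; simp at hlen
  · obtain ⟨i, hi, hgi⟩ := List.mem_iff_getElem.mp (dQuirk_zero_mem order hq)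
    have hmem : ((order[i], i) : Int × Nat) ∈ order.zipIdx := by
      rw [List.mem_zipIdx_iff_getElem?]
      simp [List.getElem?_eq_getElem hi]
    have := List.all_eq_true.mp hall _ hmem
    rw [hgi, hnil] at this
    simp at this
    omega

-- the initial pool of B is exactly the avail list of A's initial availability array
theorem pool_start (n : Nat) :
    PySem.List.pyRange 0 ((n : Int) + 1) 1 =
      (avail (List.replicate (n + 1) true) 0).map (fun n : Nat => (n : Int)) := by
  rw [avail_replicate, (by push_cast; ring : ((n : Int) + 1) = ((n + 1 : Nat) : Int)), pool_init]

-- ===== VERDICT (by name: the statement is the Claim_ definition above) =====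
theorem orderToDigitSequence_spec : Claim_unchanged_orderToDigitSequence := by
  intro order digits _ _ hnd
  unfold orderToDigitSequence orderToDigitSequence_alt
  have hq : dQuirk order = false := by
    by_contra h
    exact hnd (by unfold D_orderToDigitSequence; simpa using h)
  rw [pool_start, fold_eq order (List.replicate (order.length + 1) true) digits.toList []
    (by intro hf; rw [List.head?_replicate] at hf; simp at hf) hq]

theorem orderToDigitSequence_changed : Claim_changed_orderToDigitSequence := by
  unfold Claim_changed_orderToDigitSequence; decide

theorem orderToDigitSequence_tight : Claim_exact_orderToDigitSequence := by
  intro order digits _ hpre hd heq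
  have hq : dQuirk order = true := hd
  have hne := pre_d_ne order digits hpre hq
  unfold orderToDigitSequence orderToDigitSequence_alt at heq
  rw [pool_start] at heq
  have hstrict := fold_strict order (List.replicate (order.length + 1) true) digits.toList
    [] [] (le_refl _) hne
    (by rw [avail_replicate]; simp)
    (Or.inr ⟨by rw [List.head?_replicate]; simp, hq⟩)
  have := congrArg List.length (String.ofList_inj.mp heq)
  omega
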